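-- pv_equiv track=rewrite | github.com/fatjan/practice-code | python/shipping.py | shipping
-- ===== SOURCE A (Python) =====
-- def shipping(N, h):
--   # Your solution starts here.
--     result = []
--     for i in range(N):
--         compare = []
--         for j in range(N):
--             cost = h[j]
--             if i == j:
--                 fee = 0
--             else:
--                 fee = abs(j-i)
--             compare.append(cost+fee)
--         result.append(min(compare))
--     return result
-- ===== SOURCE B (Python) =====
-- def shipping(N, h):
--     # O(N) two-pass distance-transform: left sweep then right sweep of prefix minima.
--     if N <= 0:
--         return []
--     res = h[:N]
--     for i in range(1, N):
--         res[i] = min(res[i], res[i - 1] + 1)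
--     for i in range(N - 2, -1, -1):
--         res[i] = min(res[i], res[i + 1] + 1)
--     return res
-- ===== Notes on version B (the rewrite author's own statement) =====
-- stated objective: faster
-- what changed: Replaced the quadratic all-pairs scan (for each i, min over all j of h[j]+|j-i|) by the linear two-pass distance transform: a left-to-right sweep res[i]=min(res[i],res[i-1]+1) followed by a right-to-left sweep res[i]=min(res[i],res[i+1]+1).
import Mathlib
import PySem

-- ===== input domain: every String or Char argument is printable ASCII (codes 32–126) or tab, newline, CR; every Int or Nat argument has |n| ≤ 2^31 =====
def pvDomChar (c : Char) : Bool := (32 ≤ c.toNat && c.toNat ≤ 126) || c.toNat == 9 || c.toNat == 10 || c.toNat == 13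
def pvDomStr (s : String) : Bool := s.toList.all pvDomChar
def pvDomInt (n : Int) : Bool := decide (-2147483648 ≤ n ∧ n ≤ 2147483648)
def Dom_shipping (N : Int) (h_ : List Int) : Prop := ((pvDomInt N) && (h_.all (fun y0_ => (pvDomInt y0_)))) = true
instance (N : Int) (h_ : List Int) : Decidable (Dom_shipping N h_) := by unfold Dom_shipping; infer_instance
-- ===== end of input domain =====

-- B replaces A's quadratic all-pairs minimum scan by the linear two-pass distance transform (left sweep then right sweep); objective: faster (asymptotic).

-- ===== PORT A =====
def shipping (N : Int) (h_ : List Int) : List Int :=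
  (PySem.List.pyRange 0 N 1).foldl (fun result i =>
    let compare := (PySem.List.pyRange 0 N 1).foldl (fun compare j =>
      let cost := PySem.List.pyGetD h_ j 0   -- h[j]; exact under Pre_ (0 ≤ j < N ≤ len h_)
      let fee := if i = j then (0 : Int) else |j - i|
      compare ++ [cost + fee]) []
    -- min(compare): compare is nonempty whenever the outer loop body runs, so the default is never used
    result ++ [(PySem.List.min? compare (fun y => y)).getD 0]) []

-- ===== PORT B =====
def shipping_alt (N : Int) (h_ : List Int) : List Int :=
  if N ≤ 0 then []
  else
    let res0 := PySem.List.slice h_ none (some N)          -- h[:N]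
    -- indices from range(1, N) and range(N-2, -1, -1) are nonnegative, so pyGetD/pySetD are exact here
    let res1 := (PySem.List.pyRange 1 N 1).foldl (fun r i =>
      PySem.List.pySetD r i (min (PySem.List.pyGetD r i 0) (PySem.List.pyGetD r (i - 1) 0 + 1))) res0
    (PySem.List.pyRange (N - 2) (-1) (-1)).foldl (fun r i =>
      PySem.List.pySetD r i (min (PySem.List.pyGetD r i 0) (PySem.List.pyGetD r (i + 1) 0 + 1))) res1

-- ===== PRECONDITION & SPEC =====
-- A raises IndexError (h[j]) when N exceeds len(h); exactly those inputs are excluded.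
def Pre_shipping (N : Int) (h_ : List Int) : Prop := N ≤ (h_.length : Int)
instance (N : Int) (h_ : List Int) : Decidable (Pre_shipping N h_) := by unfold Pre_shipping; infer_instance
def pvWitness_shipping : Int × List Int := (3, [5, 1, 4])
def Spec_shipping (N : Int) (h_ : List Int) (out : List Int) : Prop := out = shipping_alt N h_
instance (N : Int) (h_ : List Int) (out : List Int) : Decidable (Spec_shipping N h_ out) := by unfold Spec_shipping; infer_instance

-- ===== CLAIM (what is proved, stated in full; the proofs are below) =====
def Claim_equal_shipping : Prop := ∀ (N : Int) (h_ : List Int), Dom_shipping N h_ → Pre_shipping N h_ → Spec_shipping N h_ (shipping N h_)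

-- ===== LEMMAS AND PROOFS =====

-- minimum of f over indices 0..k
def pvVmin (f : Nat → Int) : Nat → Int
  | 0 => f 0
  | k + 1 => min (pvVmin f k) (f (k + 1))

-- value of h_[k] (total form; both ports only read indices below len h_ under Pre_)
def pvHv (h_ : List Int) (k : Nat) : Int := h_.getD k 0

-- the quantity minimised for target index i
def pvG (h_ : List Int) (i j : Nat) : Int := pvHv h_ j + |(j : Int) - (i : Int)|

-- left-sweep values
def pvL (h_ : List Int) : Nat → Int
  | 0 => pvHv h_ 0
  | k + 1 => min (pvHv h_ (k + 1)) (pvL h_ k + 1)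

-- final values, indexed by distance d from the right end (index n-1-d)
def pvFf (h_ : List Int) (n : Nat) : Nat → Int
  | 0 => pvL h_ (n - 1)
  | d + 1 => min (pvL h_ (n - 1 - (d + 1))) (pvFf h_ n d + 1)

def pvF (h_ : List Int) (n k : Nat) : Int := pvFf h_ n (n - 1 - k)

-- Python's min(xs) for nonempty xs (the default is irrelevant)
def pvMinList : List Int → Int
  | [] => 0
  | x :: t => t.foldl min x

-- the two loop bodies of B, named so that the sweep lemmas can speak about them
def pvStepL (r : List Int) (i : Int) : List Int :=
  PySem.List.pySetD r i (min (PySem.List.pyGetD r i 0) (PySem.List.pyGetD r (i - 1) 0 + 1))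
def pvStepR (r : List Int) (i : Int) : List Int :=
  PySem.List.pySetD r i (min (PySem.List.pyGetD r i 0) (PySem.List.pyGetD r (i + 1) 0 + 1))

theorem pvVmin_congr (f g : Nat → Int) (k : Nat) (h : ∀ j, j ≤ k → f j = g j) :
    pvVmin f k = pvVmin g k := by
  induction k with
  | zero => simpa [pvVmin] using h 0 le_rfl
  | succ k ih =>
    simp only [pvVmin]
    rw [ih (fun j hj => h j (Nat.le_succ_of_le hj)), h (k + 1) le_rfl]

theorem pvVmin_le (f : Nat → Int) (k j : Nat) (hj : j ≤ k) : pvVmin f k ≤ f j := by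
  induction k with
  | zero => interval_cases j; simp [pvVmin]
  | succ k ih =>
    rcases Nat.lt_or_ge j (k + 1) with hlt | hge
    · exact le_trans (min_le_left _ _) (ih (Nat.lt_succ_iff.mp hlt))
    · have : j = k + 1 := le_antisymm hj hge
      subst this; exact min_le_right _ _

theorem pvVmin_exists (f : Nat → Int) (k : Nat) : ∃ j, j ≤ k ∧ pvVmin f k = f j := by
  induction k with
  | zero => exact ⟨0, le_rfl, rfl⟩
  | succ k ih =>
    rcases ih with ⟨j, hj, hv⟩
    rcases le_total (pvVmin f k) (f (k + 1)) with hle | hle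
    · exact ⟨j, Nat.le_succ_of_le hj, by simp only [pvVmin]; rw [min_eq_left hle, hv]⟩
    · exact ⟨k + 1, le_rfl, by simp only [pvVmin]; rw [min_eq_right hle]⟩

theorem pvVmin_add_const (f : Nat → Int) (c : Int) (k : Nat) :
    pvVmin (fun j => f j + c) k = pvVmin f k + c := by
  induction k with
  | zero => rfl
  | succ k ih => simp [pvVmin, ih, min_add_add_right]

theorem pvMinList_append_singleton (l : List Int) (x : Int) (hl : l ≠ []) :
    pvMinList (l ++ [x]) = min (pvMinList l) x := by
  cases l with
  | nil => simp at hl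
  | cons y t => simp [pvMinList, List.foldl_append]

theorem pvMinList_map_range (f : Nat → Int) (k : Nat) :
    pvMinList ((List.range (k + 1)).map f) = pvVmin f k := by
  induction k with
  | zero => simp [pvMinList, pvVmin, List.range_succ]
  | succ k ih =>
    rw [List.range_succ (n := k + 1), List.map_append, List.map_cons, List.map_nil,
      pvMinList_append_singleton _ _ (by simp [List.range_succ])]
    simp [pvVmin, ih]

theorem pvMinD_nonempty (l : List Int) (hl : l ≠ []) :
    (PySem.List.min? l (fun y => y)).getD 0 = pvMinList l := by
  cases l with
  | nil => simp at hl
  | cons x t => rw [PySem.List.min?_id_cons]; rfl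

-- ===== A-side characterisation =====

theorem shipping_eq_map (n : Nat) (h_ : List Int) (hn : 0 < n) :
    shipping (n : Int) h_ = (List.range n).map (fun i => pvVmin (pvG h_ i) (n - 1)) := by
  simp only [shipping, PySem.List.pyRange_zero_nat, PySem.List.foldl_append_singleton_eq_map,
    List.nil_append, List.map_map]
  apply List.map_congr_left
  intro i hi
  simp only [Function.comp]
  have hmap : (List.range n).map
      ((fun j : Int => PySem.List.pyGetD h_ j 0 + if (i : Int) = j then (0 : Int) else |j - (i : Int)|)
        ∘ (fun k : Nat => (k : Int)))
      = (List.range n).map (pvG h_ i) := by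
    apply List.map_congr_left
    intro j hj
    simp only [Function.comp, PySem.List.pyGetD_natCast]
    by_cases hij : i = j
    · subst hij; simp [pvG, pvHv]
    · have hne : ¬ ((i : Int) = (j : Int)) := by exact_mod_cast hij
      simp only [hne, if_false]
      rfl
  have hrange : List.range n = List.range ((n - 1) + 1) := by congr 1; omega
  rw [hmap, hrange, pvMinD_nonempty _ (by simp), pvMinList_map_range]

-- ===== B-side characterisation =====

theorem pvF_last (h_ : List Int) (n : Nat) : pvF h_ n (n - 1) = pvL h_ (n - 1) := by
  unfold pvF
  rw [Nat.sub_self]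
  rfl

theorem pvF_rec (h_ : List Int) (n k : Nat) (hk : k + 1 < n) :
    pvF h_ n k = min (pvL h_ k) (pvF h_ n (k + 1) + 1) := by
  unfold pvF
  have h1 : n - 1 - k = (n - 1 - (k + 1)) + 1 := by omega
  rw [h1]
  show pvFf h_ n ((n - 1 - (k + 1)) + 1) = _
  rw [pvFf]
  congr 2
  omega

theorem pvLeftPass (h_ : List Int) (n : Nat) :
    ∀ (t m : Nat) (r : List Int), 1 ≤ m → m + t ≤ n → r.length = n →
    (∀ k, k < n → r.getD k 0 = if k < m then pvL h_ k else pvHv h_ k) →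
    ((PySem.List.pyRange (m : Int) ((m + t : Nat) : Int) 1).foldl pvStepL r).length = n ∧
    (∀ k, k < n → ((PySem.List.pyRange (m : Int) ((m + t : Nat) : Int) 1).foldl pvStepL r).getD k 0
      = if k < m + t then pvL h_ k else pvHv h_ k) := by
  intro t
  induction t with
  | zero =>
    intro m r hm hmt hlen hr
    rw [PySem.List.pyRange_one_eq_nil (by simp)]
    simpa using ⟨hlen, hr⟩
  | succ t ih =>
    intro m r hm hmt hlen hr
    rw [show m + (t + 1) = (m + 1) + t from by omega] at hmt ⊢
    have hcons : PySem.List.pyRange (m : Int) (((m + 1) + t : Nat) : Int) 1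
        = (m : Int) :: PySem.List.pyRange (((m + 1 : Nat)) : Int) (((m + 1) + t : Nat) : Int) 1 := by
      rw [PySem.List.pyRange_one_cons (by exact_mod_cast (show m < m + 1 + t by omega)),
        show (m : Int) + 1 = ((m + 1 : Nat) : Int) from by omega]
    rw [hcons, List.foldl_cons]
    have hmn : m < n := by omega
    have hm1n : m - 1 < n := by omega
    have hstep : pvStepL r (m : Int) = r.set m (pvL h_ m) := by
      unfold pvStepL
      have hc : (m : Int) - 1 = ((m - 1 : Nat) : Int) := by omega
      rw [hc, PySem.List.pyGetD_natCast, PySem.List.pyGetD_natCast, PySem.List.pySetD_natCast]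
      have h1 : r.getD m 0 = pvHv h_ m := by rw [hr m hmn]; simp
      have h2 : r.getD (m - 1) 0 = pvL h_ (m - 1) := by rw [hr (m - 1) hm1n]; simp [Nat.sub_lt hm]
      rw [h1, h2]
      have hm' : m = (m - 1) + 1 := by omega
      rw [hm']
      rfl
    rw [hstep]
    exact ih (m + 1) (r.set m (pvL h_ m)) (by omega) hmt (by simpa using hlen)
      (by
        intro k hk
        rw [List.getD_eq_getElem?_getD, List.getElem?_set]
        by_cases hkm : m = k
        · subst hkm
          rw [if_pos rfl, if_pos (show m < r.length by omega), if_pos (show m < m + 1 by omega)]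
          rfl
        · rw [if_neg hkm, ← List.getD_eq_getElem?_getD, hr k hk]
          by_cases h1 : k < m
          · rw [if_pos h1, if_pos (by omega)]
          · rw [if_neg h1, if_neg (by omega)])

theorem pvRightPass (h_ : List Int) (n : Nat) (hn : 0 < n) :
    ∀ (t : Nat) (r : List Int), t ≤ n - 1 → r.length = n →
    (∀ k, k < n → r.getD k 0 = if k < t then pvL h_ k else pvF h_ n k) →
    ((PySem.List.pyRange ((t : Int) - 1) (-1) (-1)).foldl pvStepR r).length = n ∧
    (∀ k, k < n → ((PySem.List.pyRange ((t : Int) - 1) (-1) (-1)).foldl pvStepR r).getD k 0 = pvF h_ n k) := by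
  intro t
  induction t with
  | zero =>
    intro r ht hlen hr
    rw [show ((0 : Nat) : Int) - 1 = -1 by norm_num, PySem.List.pyRange_neg_one_eq_nil le_rfl]
    exact ⟨hlen, fun k hk => by simpa using hr k hk⟩
  | succ t ih =>
    intro r ht hlen hr
    have hcons : PySem.List.pyRange (((t + 1 : Nat) : Int) - 1) (-1) (-1)
        = (t : Int) :: PySem.List.pyRange ((t : Int) - 1) (-1) (-1) := by
      have : ((t + 1 : Nat) : Int) - 1 = (t : Int) := by push_cast; ring
      rw [this, PySem.List.pyRange_neg_one_cons (by omega)]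
    rw [hcons, List.foldl_cons]
    have htn : t < n := by omega
    have ht1n : t + 1 < n := by omega
    have hstep : pvStepR r (t : Int) = r.set t (pvF h_ n t) := by
      unfold pvStepR
      have hc : (t : Int) + 1 = ((t + 1 : Nat) : Int) := by push_cast; ring
      rw [hc, PySem.List.pyGetD_natCast, PySem.List.pyGetD_natCast, PySem.List.pySetD_natCast]
      have h1 : r.getD t 0 = pvL h_ t := by rw [hr t htn]; simp
      have h2 : r.getD (t + 1) 0 = pvF h_ n (t + 1) := by rw [hr (t + 1) ht1n]; simp
      rw [h1, h2, ← pvF_rec h_ n t ht1n]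
    rw [hstep]
    exact ih (r.set t (pvF h_ n t)) (by omega) (by simpa using hlen)
      (by
        intro k hk
        rw [List.getD_eq_getElem?_getD, List.getElem?_set]
        by_cases hkt : t = k
        · subst hkt
          rw [if_pos rfl, if_pos (show t < r.length by omega), if_neg (show ¬ t < t by omega)]
          rfl
        · rw [if_neg hkt, ← List.getD_eq_getElem?_getD, hr k hk]
          by_cases h1 : k < t
          · rw [if_pos h1, if_pos (by omega)]
          · rw [if_neg h1, if_neg (by omega)])

theorem shipping_alt_eq_map (n : Nat) (h_ : List Int) (hn : 0 < n) (hlen : n ≤ h_.length) :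
    shipping_alt (n : Int) h_ = (List.range n).map (fun k => pvF h_ n k) := by
  have hnle : ¬ ((n : Int) ≤ 0) := by omega
  simp only [shipping_alt, if_neg hnle]
  rw [show (fun (r : List Int) (i : Int) =>
      PySem.List.pySetD r i (min (PySem.List.pyGetD r i 0) (PySem.List.pyGetD r (i - 1) 0 + 1))) = pvStepL from rfl,
    show (fun (r : List Int) (i : Int) =>
      PySem.List.pySetD r i (min (PySem.List.pyGetD r i 0) (PySem.List.pyGetD r (i + 1) 0 + 1))) = pvStepR from rfl]
  have hres0 : PySem.List.slice h_ none (some (n : Int)) = h_.take n := by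
    rw [PySem.List.slice_to h_ (by omega)]; simp
  rw [hres0]
  have hlen0 : (h_.take n).length = n := by simp [hlen]
  have hinv0 : ∀ k, k < n → (h_.take n).getD k 0 = if k < 1 then pvL h_ k else pvHv h_ k := by
    intro k hk
    have htk : (h_.take n).getD k 0 = h_.getD k 0 := by
      rw [List.getD_eq_getElem _ _ (by omega), List.getD_eq_getElem _ _ (by omega), List.getElem_take]
    rw [htk]
    by_cases h1 : k < 1
    · have hk0 : k = 0 := by omega
      subst hk0; rw [if_pos h1]; rfl
    · rw [if_neg h1]; rfl
  have hL := pvLeftPass h_ n (n - 1) 1 (h_.take n) le_rfl (by omega) hlen0 hinv0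
  have hrw : ((1 + (n - 1) : Nat) : Int) = (n : Int) := by omega
  rw [hrw] at hL
  simp only [Nat.cast_one] at hL
  obtain ⟨hL1, hL2⟩ := hL
  have hinv1 : ∀ k, k < n → ((PySem.List.pyRange 1 (n : Int) 1).foldl pvStepL (h_.take n)).getD k 0
      = if k < n - 1 then pvL h_ k else pvF h_ n k := by
    intro k hk
    rw [hL2 k hk, if_pos (by omega)]
    by_cases h1 : k < n - 1
    · rw [if_pos h1]
    · rw [if_neg h1]
      have hkn1 : k = n - 1 := by omega
      subst hkn1
      rw [pvF_last]
  have hR := pvRightPass h_ n hn (n - 1) _ le_rfl hL1 hinv1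
  have hrw2 : ((n : Int) - 2) = (((n - 1 : Nat) : Int) - 1) := by omega
  rw [hrw2]
  obtain ⟨hR1, hR2⟩ := hR
  apply List.ext_getElem
  · simp [hR1]
  · intro k hk1 hk2
    have hkn : k < n := by rw [hR1] at hk1; exact hk1
    have hv := hR2 k hkn
    rw [List.getD_eq_getElem _ _ (by omega)] at hv
    simp only [List.getElem_map, List.getElem_range]
    exact hv

-- ===== the two closed forms agree =====

theorem pvL_eq_vmin (h_ : List Int) (k : Nat) :
    pvL h_ k = pvVmin (fun j => pvHv h_ j + ((k : Int) - (j : Int))) k := by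
  induction k with
  | zero => simp [pvL, pvVmin]
  | succ k ih =>
    have h1 : pvVmin (fun j => pvHv h_ j + (((k + 1 : Nat) : Int) - (j : Int))) k
        = pvVmin (fun j => pvHv h_ j + ((k : Int) - (j : Int))) k + 1 := by
      rw [← pvVmin_add_const]
      exact pvVmin_congr _ _ k (fun j _ => by push_cast; ring)
    simp only [pvVmin, pvL, ih, h1]
    have h2 : pvHv h_ (k + 1) + (((k + 1 : Nat) : Int) - ((k + 1 : Nat) : Int)) = pvHv h_ (k + 1) := by ring
    rw [h2, min_comm]

theorem pvAbs_succ_bound (x y : Int) : |x - y| ≤ |x - (y + 1)| + 1 := by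
  rcases abs_cases (x - y) with ⟨h1, h2⟩ | ⟨h1, h2⟩ <;>
    rcases abs_cases (x - (y + 1)) with ⟨h3, h4⟩ | ⟨h3, h4⟩ <;> omega

theorem pvKey (h_ : List Int) (n k : Nat) (hk : k + 1 ≤ n - 1) :
    min (pvL h_ k) (pvVmin (pvG h_ (k + 1)) (n - 1) + 1) = pvVmin (pvG h_ k) (n - 1) := by
  have hGL : ∀ j, j ≤ k → pvHv h_ j + ((k : Int) - (j : Int)) = pvG h_ k j := by
    intro j hj
    have hj' : (j : Int) ≤ (k : Int) := by exact_mod_cast hj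
    unfold pvG
    rw [abs_sub_comm, abs_of_nonneg (by omega)]
  apply le_antisymm
  · -- min ≤ pvVmin (pvG k) (n-1)
    obtain ⟨j, hj, hv⟩ := pvVmin_exists (pvG h_ k) (n - 1)
    rw [hv]
    by_cases hjk : j ≤ k
    · refine le_trans (min_le_left _ _) ?_
      rw [pvL_eq_vmin]
      calc pvVmin (fun j => pvHv h_ j + ((k : Int) - (j : Int))) k
          ≤ pvHv h_ j + ((k : Int) - (j : Int)) := pvVmin_le _ k j hjk
        _ = pvG h_ k j := hGL j hjk
    · have hjk2 : k < j := by omega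
      refine le_trans (min_le_right _ _) ?_
      have hle : pvVmin (pvG h_ (k + 1)) (n - 1) ≤ pvG h_ (k + 1) j := pvVmin_le _ _ j hj
      have heq : pvG h_ (k + 1) j + 1 = pvG h_ k j := by
        unfold pvG
        have h1 : ((k : Int) + 1) ≤ (j : Int) := by exact_mod_cast hjk2
        push_cast
        rw [abs_of_nonneg (by omega), abs_of_nonneg (by omega)]
        ring
      linarith
  · -- pvVmin (pvG k) (n-1) ≤ min
    apply le_min
    · obtain ⟨j, hj, hv⟩ := pvVmin_exists (fun j => pvHv h_ j + ((k : Int) - (j : Int))) k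
      rw [pvL_eq_vmin, hv, hGL j hj]
      exact pvVmin_le _ _ j (le_trans hj (by omega))
    · obtain ⟨j, hj, hv⟩ := pvVmin_exists (pvG h_ (k + 1)) (n - 1)
      rw [hv]
      have h1 : pvG h_ k j ≤ pvG h_ (k + 1) j + 1 := by
        unfold pvG
        push_cast
        linarith [pvAbs_succ_bound (j : Int) (k : Int)]
      exact le_trans (pvVmin_le _ _ j hj) h1

theorem pvFf_eq_vmin (h_ : List Int) (n : Nat) (hn : 0 < n) :
    ∀ d, d < n → pvFf h_ n d = pvVmin (pvG h_ (n - 1 - d)) (n - 1) := by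
  intro d
  induction d with
  | zero =>
    intro _
    show pvL h_ (n - 1) = _
    rw [pvL_eq_vmin, Nat.sub_zero]
    apply pvVmin_congr
    intro j hj
    have hj' : (j : Int) ≤ ((n - 1 : Nat) : Int) := by exact_mod_cast hj
    unfold pvG
    rw [abs_sub_comm, abs_of_nonneg (by omega)]
  | succ d ih =>
    intro hd
    have hk : n - 1 - (d + 1) + 1 = n - 1 - d := by omega
    rw [pvFf, ih (by omega), ← hk]
    exact pvKey h_ n (n - 1 - (d + 1)) (by omega)

theorem pvF_eq_vmin (h_ : List Int) (n k : Nat) (hk : k < n) :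
    pvF h_ n k = pvVmin (pvG h_ k) (n - 1) := by
  unfold pvF
  rw [pvFf_eq_vmin h_ n (by omega) (n - 1 - k) (by omega)]
  congr 2
  omega

-- ===== VERDICT (by name: the statement is the Claim_ definition above) =====
theorem shipping_spec : Claim_equal_shipping := by
  intro N h_ _ hpre
  unfold Spec_shipping
  by_cases hN : N ≤ 0
  · simp [shipping, shipping_alt, hN, PySem.List.pyRange_one_eq_nil hN]
  · have hN2 : 0 < N := by omega
    have hNn : N = ((N.toNat : Nat) : Int) := by omega
    have hn : 0 < N.toNat := by omega
    have hlen : N.toNat ≤ h_.length := by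
      unfold Pre_shipping at hpre; omega
    rw [hNn, shipping_eq_map N.toNat h_ hn, shipping_alt_eq_map N.toNat h_ hn hlen]
    apply List.map_congr_left
    intro k hk
    exact (pvF_eq_vmin h_ N.toNat k (List.mem_range.mp hk)).symm
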